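-- pv_equiv track=rewrite | github.com/MikeMcTEALS/Powerball | main.py | calculate_winnings
-- ===== SOURCE A (Python) =====
-- NUMBER_OF_WHITEBALLS = 5  # Number of whiteballs to generate
--
-- def calculate_winnings(quick_pick_ticket, winning_ticket):
--     my_winnings = 0
--     matching_white_balls = 0
--     matched_powerball = False
--
--     # Let's see if we matched the Powerball first
--     if quick_pick_ticket[-1] == winning_ticket[-1]:
--         matched_powerball = True
--         my_winnings = 4
--
--     # Did we match any of the other numbers
--     for ball in range(0, NUMBER_OF_WHITEBALLS):
--         if quick_pick_ticket[ball] in winning_ticket: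
--             matching_white_balls += 1
--
--     '''
--         • 5 Correct White Balls and the Powerball: Jackpot (starts at $40 million, has no upper limit)
--         • 4 Correct White Balls and the Powerball: $50,000
--         • 3 Correct White Balls and the Powerball: $100
--         • 2 Correct White Balls and the Powerball: $7
--         • 1 Correct White Ball and the Powerball: $4
--         • No White Balls, Just the Powerball: $4
--     '''
--     if matched_powerball:
--         if matching_white_balls == 1:
--             my_winnings = 4
--         if matching_white_balls == 2:
--             my_winnings = 7
--         if matching_white_balls == 3:
--             my_winnings = 100
--         if matching_white_balls == 4:
--             my_winnings = 50000
--         if matching_white_balls == 5: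
--             my_winnings = 40000000
--     else:
--         '''
--             • 5 Correct White Balls, but no Powerball: $1,000,000
--             • 4 Correct White Balls, but no Powerball: $100
--             • 3 Correct White Balls, but no Powerball: $7
--         '''
--         if matching_white_balls == 3:
--             my_winnings = 7
--         if matching_white_balls == 4:
--             my_winnings = 100
--         if matching_white_balls == 5:
--             my_winnings = 1000000
--
--     return my_winnings
-- ===== SOURCE B (Python) =====
-- # Recursive match count plus prize-row indexing: recursion replaces the loop,
-- # list indexing replaces the if/else cascade.
-- POWERBALL_PRIZES = [4, 4, 7, 100, 50000, 40000000]
-- WHITE_ONLY_PRIZES = [0, 0, 0, 7, 100, 1000000]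
--
-- def calculate_winnings(quick_pick_ticket, winning_ticket):
--     def count_matches(balls):
--         if not balls:
--             return 0
--         return int(balls[0] in winning_ticket) + count_matches(balls[1:])
--
--     w = count_matches(quick_pick_ticket[:5])
--     if quick_pick_ticket[-1] == winning_ticket[-1]:
--         return POWERBALL_PRIZES[w]
--     return WHITE_ONLY_PRIZES[w]
-- ===== Notes on version B (the rewrite author's own statement) =====
-- stated objective: alternative
-- what changed: The per-position range loop becomes a recursive count over the first-five slice, and the if/else prize cascade is replaced by indexing one of two prize rows (powerball vs no-powerball) with the match count.
import Mathlib
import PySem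

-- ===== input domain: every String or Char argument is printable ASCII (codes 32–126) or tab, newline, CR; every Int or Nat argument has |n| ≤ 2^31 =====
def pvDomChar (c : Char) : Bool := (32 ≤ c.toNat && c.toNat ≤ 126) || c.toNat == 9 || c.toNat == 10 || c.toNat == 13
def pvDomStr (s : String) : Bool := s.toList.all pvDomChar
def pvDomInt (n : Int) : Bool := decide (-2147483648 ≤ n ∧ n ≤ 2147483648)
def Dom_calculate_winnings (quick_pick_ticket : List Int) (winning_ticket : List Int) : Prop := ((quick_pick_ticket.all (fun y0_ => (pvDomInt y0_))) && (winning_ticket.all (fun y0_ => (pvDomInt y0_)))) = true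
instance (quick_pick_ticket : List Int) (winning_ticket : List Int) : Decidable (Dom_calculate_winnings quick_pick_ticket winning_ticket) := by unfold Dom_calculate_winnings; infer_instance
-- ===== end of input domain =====

-- B counts matches by recursion over the first-five slice and indexes one of two prize rows instead of A's if/else cascade; same return values on all tickets A handles.


-- ===== PORT A =====
def calculate_winnings (quick_pick_ticket : List Int) (winning_ticket : List Int) : Int :=
  let my_winnings : Int := 0
  let matched_powerball : Bool := false
  -- if quick_pick_ticket[-1] == winning_ticket[-1]
  let matched_powerball :=
    if (PySem.List.pyGet? quick_pick_ticket (-1)).getD 0 == (PySem.List.pyGet? winning_ticket (-1)).getD 0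
    then true else matched_powerball
  let my_winnings : Int := if matched_powerball then 4 else my_winnings
  -- for ball in range(0, NUMBER_OF_WHITEBALLS): if quick_pick_ticket[ball] in winning_ticket: ...
  let matching_white_balls : Int :=
    (PySem.List.pyRange 0 5 1).foldl
      (fun acc ball =>
        if winning_ticket.contains ((PySem.List.pyGet? quick_pick_ticket ball).getD 0)
        then acc + 1 else acc) 0
  if matched_powerball then
    let my_winnings := if matching_white_balls = 1 then (4 : Int) else my_winnings
    let my_winnings := if matching_white_balls = 2 then (7 : Int) else my_winnings
    let my_winnings := if matching_white_balls = 3 then (100 : Int) else my_winnings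
    let my_winnings := if matching_white_balls = 4 then (50000 : Int) else my_winnings
    let my_winnings := if matching_white_balls = 5 then (40000000 : Int) else my_winnings
    my_winnings
  else
    let my_winnings := if matching_white_balls = 3 then (7 : Int) else my_winnings
    let my_winnings := if matching_white_balls = 4 then (100 : Int) else my_winnings
    let my_winnings := if matching_white_balls = 5 then (1000000 : Int) else my_winnings
    my_winnings

-- ===== PORT B =====
-- count_matches(balls): structural recursion of Source B
def pvCountMatches (winning_ticket : List Int) : List Int → Int
  | [] => 0
  | b :: rest => (if winning_ticket.contains b then 1 else 0) + pvCountMatches winning_ticket rest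

def pvPowerballPrizes : List Int := [4, 4, 7, 100, 50000, 40000000]
def pvWhiteOnlyPrizes : List Int := [0, 0, 0, 7, 100, 1000000]

def calculate_winnings_alt (quick_pick_ticket : List Int) (winning_ticket : List Int) : Int :=
  let w := pvCountMatches winning_ticket (PySem.List.slice quick_pick_ticket (some 0) (some 5))
  -- row[w]: w is always in 0..5 and each row has length 6, so Python never raises here
  if (PySem.List.pyGet? quick_pick_ticket (-1)).getD 0 == (PySem.List.pyGet? winning_ticket (-1)).getD 0 then
    (PySem.List.pyGet? pvPowerballPrizes w).getD 0
  else
    (PySem.List.pyGet? pvWhiteOnlyPrizes w).getD 0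

-- ===== PRECONDITION & SPEC =====
-- Pre_ excludes exactly the inputs where Python A raises IndexError: it reads
-- quick_pick_ticket[0..4] and both tickets' [-1], so it needs len(quick_pick_ticket) >= 5
-- and a nonempty winning_ticket.
def Pre_calculate_winnings (quick_pick_ticket : List Int) (winning_ticket : List Int) : Prop :=
  5 ≤ quick_pick_ticket.length ∧ winning_ticket ≠ []
instance (quick_pick_ticket : List Int) (winning_ticket : List Int) : Decidable (Pre_calculate_winnings quick_pick_ticket winning_ticket) := by unfold Pre_calculate_winnings; infer_instance
def pvWitness_calculate_winnings : List Int × List Int := ([1, 2, 3, 4, 5, 6], [3, 4, 9, 10, 11, 6])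

def Spec_calculate_winnings (quick_pick_ticket : List Int) (winning_ticket : List Int) (out : Int) : Prop := out = calculate_winnings_alt quick_pick_ticket winning_ticket
instance (quick_pick_ticket : List Int) (winning_ticket : List Int) (out : Int) : Decidable (Spec_calculate_winnings quick_pick_ticket winning_ticket out) := by unfold Spec_calculate_winnings; infer_instance

-- ===== CLAIM (what is proved, stated in full; the proofs are below) =====
def Claim_equal_calculate_winnings : Prop := ∀ (quick_pick_ticket : List Int) (winning_ticket : List Int), Dom_calculate_winnings quick_pick_ticket winning_ticket → Pre_calculate_winnings quick_pick_ticket winning_ticket → Spec_calculate_winnings quick_pick_ticket winning_ticket (calculate_winnings quick_pick_ticket winning_ticket)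

-- ===== LEMMAS AND PROOFS =====

-- ===== VERDICT (by name: the statement is the Claim_ definition above) =====
theorem calculate_winnings_spec : Claim_equal_calculate_winnings := by
  intro qp wt _ hpre
  obtain ⟨h5, hwt⟩ := hpre
  match qp, h5 with
  | a :: b :: c :: d :: e :: rest, _ =>
    unfold Spec_calculate_winnings calculate_winnings calculate_winnings_alt
    have hr5 : PySem.List.pyRange 0 5 1 = [0,1,2,3,4] := by decide
    have hsl : PySem.List.slice (a::b::c::d::e::rest) (some 0) (some 5) = [a,b,c,d,e] := by
      have h := PySem.List.slice_natCast (a::b::c::d::e::rest) 0 5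
      simp at h
      exact h
    have g0 : PySem.List.pyGet? (a::b::c::d::e::rest) (0:Int) = some a :=
      PySem.List.pyGet?_zero_cons a (b::c::d::e::rest)
    have g1 : PySem.List.pyGet? (a::b::c::d::e::rest) (1:Int) = some b := by
      have h := PySem.List.pyGet?_ofNat (a::b::c::d::e::rest) 1 (by simp); simpa using h
    have g2 : PySem.List.pyGet? (a::b::c::d::e::rest) (2:Int) = some c := by
      have h := PySem.List.pyGet?_ofNat (a::b::c::d::e::rest) 2 (by simp); simpa using h
    have g3 : PySem.List.pyGet? (a::b::c::d::e::rest) (3:Int) = some d := by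
      have h := PySem.List.pyGet?_ofNat (a::b::c::d::e::rest) 3 (by simp); simpa using h
    have g4 : PySem.List.pyGet? (a::b::c::d::e::rest) (4:Int) = some e := by
      have h := PySem.List.pyGet?_ofNat (a::b::c::d::e::rest) 4 (by simp); simpa using h
    simp only [hr5, hsl, List.foldl_cons, List.foldl_nil, g0, g1, g2, g3, g4,
      Option.getD_some, pvCountMatches]
    cases hpb : ((PySem.List.pyGet? (a::b::c::d::e::rest) (-1)).getD 0
        == (PySem.List.pyGet? wt (-1)).getD 0) <;>
      by_cases h1 : a ∈ wt <;> by_cases h2 : b ∈ wt <;> by_cases h3 : c ∈ wt <;>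
      by_cases h4 : d ∈ wt <;> by_cases h5 : e ∈ wt <;>
      simp [h1, h2, h3, h4, h5, pvPowerballPrizes, pvWhiteOnlyPrizes]
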